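-- pv_equiv track=rewrite | github.com/1193639809ZD/PythonStudy | 笔试/美团/2023-秋/5_小美的排列构造.py | construct_permutation
-- ===== SOURCE A (Python) =====
-- def construct_permutation(n):
--     """构造一个长度为n的排列，使其权值尽可能小"""
--     permutation = [0] * n
--     for i in range(n):
--         if i % 2 == 0:
--             permutation[i] = i // 2 + 1
--         else:
--             permutation[i] = n - (i // 2)
--
--     return permutation
-- ===== SOURCE B (Python) =====
-- def construct_permutation(n):
--     """构造一个长度为n的排列，使其权值尽可能小"""
--     lows = list(range(1, (n + 1) // 2 + 1))
--     highs = list(range(n, n - n // 2, -1))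
--     res = []
--     for lo, hi in zip(lows, highs):
--         res.append(lo)
--         res.append(hi)
--     if len(highs) < len(lows):
--         res.append(lows[-1])
--     return res
-- ===== Notes on version B (the rewrite author's own statement) =====
-- stated objective: alternative
-- what changed: B builds the two monotone halves as explicit ranges and interleaves them with zip plus one leftover append, removing the per-index parity branch and i//2 arithmetic of A's fill-by-index loop.
import Mathlib
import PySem

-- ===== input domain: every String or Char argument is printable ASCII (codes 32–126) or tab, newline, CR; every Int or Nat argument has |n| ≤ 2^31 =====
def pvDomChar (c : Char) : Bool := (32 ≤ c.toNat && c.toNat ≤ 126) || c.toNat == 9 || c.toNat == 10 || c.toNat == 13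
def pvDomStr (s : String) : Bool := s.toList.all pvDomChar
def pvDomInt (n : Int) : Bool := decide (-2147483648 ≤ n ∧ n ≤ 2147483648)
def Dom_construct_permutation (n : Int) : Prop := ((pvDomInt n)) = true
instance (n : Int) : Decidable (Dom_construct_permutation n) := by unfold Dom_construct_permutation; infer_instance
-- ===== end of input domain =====

-- B builds the two monotone halves as explicit integer ranges and interleaves them (zip + one leftover append) instead of A's fill-by-index loop with a parity branch; alternative decomposition, same O(n) cost.


-- ===== PORT A =====
def construct_permutation (n : Int) : List Int :=
  let permutation := List.replicate n.toNat (0 : Int)   -- permutation = [0] * n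
  (PySem.List.pyRange 0 n 1).foldl                       -- for i in range(n)
    (fun p i =>
      if PySem.Int.mod i 2 = 0 then p.set i.toNat (PySem.Int.floordiv i 2 + 1)   -- permutation[i] = i // 2 + 1  (i in range, so set never clamps)
      else p.set i.toNat (n - PySem.Int.floordiv i 2))                           -- permutation[i] = n - (i // 2)
    permutation

-- ===== PORT B =====
def construct_permutation_alt (n : Int) : List Int :=
  let lows := PySem.List.pyRange 1 (PySem.Int.floordiv (n + 1) 2 + 1) 1          -- list(range(1, (n + 1) // 2 + 1))
  let highs := PySem.List.pyRange n (n - PySem.Int.floordiv n 2) (-1)            -- list(range(n, n - n // 2, -1))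
  let res := (lows.zip highs).foldl (fun a p => a ++ [p.1, p.2]) []              -- for lo, hi in zip(lows, highs): append both
  if highs.length < lows.length then res ++ [PySem.List.pyGetD lows (-1) 0] else res   -- leftover lows[-1] when n is odd

-- ===== PRECONDITION & SPEC =====
def Spec_construct_permutation (n : Int) (out : List Int) : Prop := out = construct_permutation_alt n
instance (n : Int) (out : List Int) : Decidable (Spec_construct_permutation n out) := by unfold Spec_construct_permutation; infer_instance

-- ===== CLAIM (what is proved, stated in full; the proofs are below) =====
def Claim_equal_construct_permutation : Prop := ∀ (n : Int), Dom_construct_permutation n → Spec_construct_permutation n (construct_permutation n)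

-- ===== LEMMAS AND PROOFS =====

-- the common value of both programs at index i
def cpSpecVal (n : Int) (i : Nat) : Int :=
  if i % 2 = 0 then ((i / 2 : Nat) : Int) + 1 else n - ((i / 2 : Nat) : Int)


-- a fold that writes g i at position i over range m, on a list of length ≥ m
theorem foldl_set_range (g : Nat → Int) :
    ∀ (m : Nat) (l : List Int), m ≤ l.length →
      (List.range m).foldl (fun p i => p.set i (g i)) l = (List.range m).map g ++ l.drop m := by
  intro m
  induction m with
  | zero => simp
  | succ m ih =>
    intro l hm
    rw [List.range_succ, List.foldl_append, List.map_append, ih l (by omega)]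
    simp only [List.foldl_cons, List.foldl_nil]
    rw [List.set_append]
    have hlen : ((List.range m).map g).length = m := by simp
    rw [if_neg (by omega)]
    have hd : l.drop m = l[m] :: l.drop (m+1) := List.drop_eq_getElem_cons (by omega)
    rw [hlen]
    rw [hd]
    simp only [Nat.sub_self, List.set_cons_zero, List.map_singleton, List.append_assoc, List.singleton_append]


theorem constructA_eq (n : Int) :
    construct_permutation n = (List.range n.toNat).map (cpSpecVal n) := by
  unfold construct_permutation
  rw [PySem.List.pyRange_one]
  have hz : (n - 0).toNat = n.toNat := by omega
  rw [hz, List.foldl_map]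
  have hfe : (fun (x : List Int) (y : Nat) =>
      if PySem.Int.mod (0 + (y:Int)) 2 = 0 then x.set (0 + (y:Int)).toNat (PySem.Int.floordiv (0 + (y:Int)) 2 + 1)
      else x.set (0 + (y:Int)).toNat (n - PySem.Int.floordiv (0 + (y:Int)) 2))
      = (fun (x : List Int) (y : Nat) => x.set y (cpSpecVal n y)) := by
    funext p k
    have h1 : PySem.Int.mod ((k:Int)) 2 = ((k % 2 : Nat) : Int) := by
      exact_mod_cast PySem.Int.mod_natCast k 2
    have h2 : PySem.Int.floordiv ((k:Int)) 2 = ((k / 2 : Nat) : Int) := by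
      exact_mod_cast PySem.Int.floordiv_natCast k 2
    simp only [zero_add, h1, h2, Int.toNat_natCast, cpSpecVal]
    by_cases h : k % 2 = 0
    · rw [if_pos (by exact_mod_cast h), if_pos h]
    · rw [if_neg (fun hc => h (by exact_mod_cast hc)), if_neg h]
  rw [hfe, foldl_set_range (cpSpecVal n) n.toNat (List.replicate n.toNat 0) (by simp)]
  simp


theorem interleave_key (n : Int) :
    ∀ (H : Nat),
      ((List.range H).map (fun (k : Nat) => ((1 + (k:Int)), (n - (k:Int))))).foldl
          (fun a p => a ++ [p.1, p.2]) ([] : List Int)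
        = (List.range (2 * H)).map (cpSpecVal n) := by
  intro H
  induction H with
  | zero => simp
  | succ H ih =>
    rw [List.range_succ, List.map_append, List.foldl_append, ih]
    have h2 : 2 * (H + 1) = (2 * H + 1) + 1 := by ring
    rw [h2, List.range_succ, List.map_append, List.range_succ, List.map_append]
    simp only [List.map_singleton, List.foldl_cons, List.foldl_nil, List.append_assoc]
    have ha : cpSpecVal n (2 * H) = 1 + (H : Int) := by
      unfold cpSpecVal
      rw [if_pos (by omega), Nat.mul_div_cancel_left H (by norm_num)]
      ring
    have hb : cpSpecVal n (2 * H + 1) = n - (H : Int) := by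
      unfold cpSpecVal
      rw [if_neg (by omega)]
      congr 1
      congr 1
      omega
    rw [ha, hb]
    rfl


theorem constructB_eq (n : Int) :
    construct_permutation_alt n = (List.range n.toNat).map (cpSpecVal n) := by
  unfold construct_permutation_alt
  by_cases hn : n ≤ 0
  · have hL : PySem.Int.floordiv (n + 1) 2 + 1 ≤ 1 := by
      rw [PySem.Int.floordiv_eq_ediv_of_pos (by norm_num)]; omega
    have hH : n ≤ n - PySem.Int.floordiv n 2 := by
      rw [PySem.Int.floordiv_eq_ediv_of_pos (by norm_num)]; omega
    rw [PySem.List.pyRange_one_eq_nil hL, PySem.List.pyRange_neg_one_eq_nil hH]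
    simp [Int.toNat_of_nonpos hn]
  · push Not at hn
    obtain ⟨N, hN⟩ : ∃ N : Nat, n = (N : Int) := ⟨n.toNat, by omega⟩
    have h1 : PySem.Int.floordiv (n + 1) 2 = (((N + 1) / 2 : Nat) : Int) := by
      rw [hN, show ((N : Int) + 1) = ((N + 1 : Nat) : Int) by push_cast; ring]
      exact_mod_cast PySem.Int.floordiv_natCast (N + 1) 2
    have h2 : PySem.Int.floordiv n 2 = ((N / 2 : Nat) : Int) := by
      rw [hN]; exact_mod_cast PySem.Int.floordiv_natCast N 2
    have hlows : PySem.List.pyRange 1 (PySem.Int.floordiv (n + 1) 2 + 1) 1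
        = (List.range ((N + 1) / 2)).map (fun (k : Nat) => (1 + (k : Int))) := by
      rw [h1, PySem.List.pyRange_one,
        show ((((N + 1) / 2 : Nat) : Int) + 1 - 1).toNat = (N + 1) / 2 from by omega]
    have hhighs : PySem.List.pyRange n (n - PySem.Int.floordiv n 2) (-1)
        = (List.range (N / 2)).map (fun (k : Nat) => n - (k : Int)) := by
      rw [h2, PySem.List.pyRange_neg_one,
        show (n - (n - ((N / 2 : Nat) : Int))).toNat = N / 2 from by omega]
    rw [hlows, hhighs]
    dsimp only
    have hNt : n.toNat = N := by omega
    by_cases hpar : N % 2 = 0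
    · have hLH : (N + 1) / 2 = N / 2 := by omega
      rw [hLH, List.zip_map', if_neg (by simp), interleave_key, hNt]
      congr 2
      omega
    · have hLH : (N + 1) / 2 = N / 2 + 1 := by omega
      rw [hLH, List.range_succ, List.map_append]
      have hzip : ((List.range (N / 2)).map (fun (k : Nat) => (1 + (k : Int)))
            ++ (List.map (fun (k : Nat) => (1 + (k : Int))) [N / 2])).zip
            ((List.range (N / 2)).map (fun (k : Nat) => n - (k : Int)))
          = ((List.range (N / 2)).map (fun (k : Nat) => (1 + (k : Int)))).zip
            ((List.range (N / 2)).map (fun (k : Nat) => n - (k : Int))) := by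
        conv_lhs => rw [show (List.range (N / 2)).map (fun (k : Nat) => n - (k : Int))
          = (List.range (N / 2)).map (fun (k : Nat) => n - (k : Int)) ++ [] from (List.append_nil _).symm]
        rw [List.zip_append (by simp)]
        simp
      rw [hzip, List.zip_map', interleave_key, if_pos (by simp),
        List.map_singleton, PySem.List.pyGetD_neg_one_append_singleton]
      have hodd : n.toNat = 2 * (N / 2) + 1 := by omega
      rw [hodd, List.range_succ, List.map_append, List.map_singleton]
      have hv : cpSpecVal n (2 * (N / 2)) = 1 + ((N / 2 : Nat) : Int) := by
        unfold cpSpecVal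
        rw [if_pos (by omega), Nat.mul_div_cancel_left _ (by norm_num)]
        ring
      rw [hv]

-- ===== VERDICT (by name: the statement is the Claim_ definition above) =====
theorem construct_permutation_spec : Claim_equal_construct_permutation := by
  intro n _
  unfold Spec_construct_permutation
  rw [constructA_eq, constructB_eq]
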